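-- pv_equiv track=rewrite | github.com/code-study-classes/python-basics-alisagubanovaa | practice_package/loops.py | count_vowel_triplets
-- ===== SOURCE A (Python) =====
-- def count_vowel_triplets(text):
--     vowels = {'a', 'e', 'i', 'o', 'u', 'y'}
--     count = 0
--     text = text.lower()
--     for i in range(len(text) - 2):
--         if (text[i] in vowels and
--             text[i + 1] in vowels and
--             text[i + 2] in vowels):
--             count += 1
--     return count
-- ===== SOURCE B (Python) =====
-- def count_vowel_triplets(text):
--     vowels = {'a', 'e', 'i', 'o', 'u', 'y'}
--     count = 0
--     streak = 0
--     for ch in text.lower():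
--         if ch in vowels:
--             streak += 1
--             if streak >= 3:
--                 count += 1
--         else:
--             streak = 0
--     return count
-- ===== Notes on version B (the rewrite author's own statement) =====
-- stated objective: alternative
-- what changed: B scans the lowered text once keeping a running vowel-streak counter (each vowel after the second in a run adds one), instead of indexing every 3-character window of the string.
import Mathlib
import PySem

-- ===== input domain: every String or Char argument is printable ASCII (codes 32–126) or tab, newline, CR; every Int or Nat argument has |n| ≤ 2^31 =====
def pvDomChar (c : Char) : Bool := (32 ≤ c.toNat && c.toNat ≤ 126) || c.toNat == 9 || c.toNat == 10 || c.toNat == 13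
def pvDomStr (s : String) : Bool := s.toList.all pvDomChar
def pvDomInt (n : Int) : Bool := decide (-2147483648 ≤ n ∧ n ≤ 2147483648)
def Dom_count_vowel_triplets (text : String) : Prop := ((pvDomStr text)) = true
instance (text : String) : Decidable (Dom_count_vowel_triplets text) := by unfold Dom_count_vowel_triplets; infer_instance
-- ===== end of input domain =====

-- B replaces A's indexed 3-window check by a single streak-counting scan; return values proved equal on all inputs.

-- ===== PORT A =====
-- literal port: loop over range(len(text)-2), index the lowered string; pyGet? never
-- returns none here since every index used lies in range.
def count_vowel_triplets (text : String) : Int :=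
  let vowels : PySem.Set Char := PySem.Set.ofList ['a', 'e', 'i', 'o', 'u', 'y']
  let t := PySem.Str.lower text
  (PySem.List.pyRange 0 (PySem.Str.len t - 2) 1).foldl
    (fun count i =>
      if ((PySem.Str.pyGet? t i).any (fun c => vowels.contains c) &&
          (PySem.Str.pyGet? t (i + 1)).any (fun c => vowels.contains c) &&
          (PySem.Str.pyGet? t (i + 2)).any (fun c => vowels.contains c))
      then count + 1 else count) 0

-- ===== PORT B =====
def count_vowel_triplets_alt (text : String) : Int :=
  let vowels : PySem.Set Char := PySem.Set.ofList ['a', 'e', 'i', 'o', 'u', 'y']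
  let r := (PySem.Str.lower text).toList.foldl
    (fun (st : Int × Int) ch =>
      if vowels.contains ch then
        (st.1 + (if st.2 + 1 ≥ 3 then 1 else 0), st.2 + 1)
      else (st.1, 0)) ((0 : Int), (0 : Int))
  r.1

-- ===== PRECONDITION & SPEC =====
def Spec_count_vowel_triplets (text : String) (out : Int) : Prop := out = count_vowel_triplets_alt text
instance (text : String) (out : Int) : Decidable (Spec_count_vowel_triplets text out) := by unfold Spec_count_vowel_triplets; infer_instance

-- ===== CLAIM (what is proved, stated in full; the proofs are below) =====
def Claim_equal_count_vowel_triplets : Prop := ∀ (text : String), Dom_count_vowel_triplets text → Spec_count_vowel_triplets text (count_vowel_triplets text)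

-- ===== LEMMAS AND PROOFS =====

def pvIsV (c : Char) : Bool :=
  PySem.Set.contains (PySem.Set.ofList ['a', 'e', 'i', 'o', 'u', 'y']) c

-- A's window test at Nat index k of list l
def pvW3 (l : List Char) (k : Nat) : Bool :=
  (l[k]?.any pvIsV) && (l[k+1]?.any pvIsV) && (l[k+2]?.any pvIsV)

-- structural version of A's window count
def pvA3 : List Char → Int
  | a :: b :: c :: t => (if pvIsV a && pvIsV b && pvIsV c then 1 else 0) + pvA3 (b :: c :: t)
  | _ => 0

-- B's remaining count given an incoming streak s
def pvWk (s : Int) : List Char → Int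
  | [] => 0
  | x :: xs => if pvIsV x then (if s ≥ 2 then 1 else 0) + pvWk (s + 1) xs else pvWk 0 xs

def pvSOf (a b : Char) : Int := if pvIsV b then (if pvIsV a then 2 else 1) else 0

theorem pvWk_cap (l : List Char) : ∀ s : Int, 2 ≤ s → pvWk s l = pvWk 2 l := by
  induction l with
  | nil => intro s _; rfl
  | cons x xs ih =>
      intro s hs
      simp only [pvWk]
      by_cases h : pvIsV x
      · have h1 : pvWk (s + 1) xs = pvWk (2 + 1) xs := by
          rw [ih (s + 1) (by omega), ih (2 + 1) (by omega)]
        simp only [h, if_true, h1]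
        congr 1
        simp only [ge_iff_le]
        rw [if_pos hs, if_pos (by omega)]
      · simp [h]

theorem pvA3_Wk (l : List Char) : ∀ a b : Char, pvA3 (a :: b :: l) = pvWk (pvSOf a b) l := by
  induction l with
  | nil => intro a b; simp [pvA3, pvWk]
  | cons c t ih =>
      intro a b
      simp only [pvA3, pvWk, ih, pvSOf]
      by_cases hc : pvIsV c
      · by_cases hb : pvIsV b
        · by_cases ha : pvIsV a
          · simp [ha, hb, hc, pvWk_cap t 3 (by omega)]
          · simp [ha, hb, hc]
        · simp [hb, hc]
      · simp [hc]

theorem pvWk_zero (l : List Char) : pvWk 0 l = pvA3 l := by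
  match l with
  | [] => rfl
  | [a] => simp [pvWk, pvA3]
  | a :: b :: l =>
      rw [pvA3_Wk]
      simp only [pvWk, pvSOf]
      by_cases ha : pvIsV a <;> by_cases hb : pvIsV b <;> simp [ha, hb]

theorem pvSum_eq_A3 (l : List Char) :
    ((List.range (l.length - 2)).map (fun k => if pvW3 l k then (1 : Int) else 0)).sum = pvA3 l := by
  match l with
  | [] => rfl
  | [a] => rfl
  | [a, b] => rfl
  | a :: b :: c :: t =>
      have hlen : (a :: b :: c :: t).length - 2 = t.length + 1 := by simp
      rw [hlen, List.range_succ_eq_map]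
      simp only [List.map_cons, List.map_map, List.sum_cons]
      have h0 : pvW3 (a :: b :: c :: t) 0 = (pvIsV a && pvIsV b && pvIsV c) := by
        simp [pvW3]
      have hshift : ∀ k : Nat, pvW3 (a :: b :: c :: t) (k + 1) = pvW3 (b :: c :: t) k := by
        intro k; simp [pvW3]
      have hmap : (List.range t.length).map ((fun k => if pvW3 (a :: b :: c :: t) k then (1 : Int) else 0) ∘ Nat.succ)
          = (List.range t.length).map (fun k => if pvW3 (b :: c :: t) k then (1 : Int) else 0) := by
        apply List.map_congr_left
        intro k _
        simp [Function.comp, hshift k]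
      have ih := pvSum_eq_A3 (b :: c :: t)
      have hlen2 : (b :: c :: t).length - 2 = t.length := by simp
      rw [hmap, h0]
      rw [hlen2] at ih
      rw [ih, pvA3]

-- fold of A's loop body = init + 0/1-sum
theorem pvFoldA {α : Type} (L : List α) (P : α → Bool) : ∀ c : Int,
    L.foldl (fun c i => if P i then c + 1 else c) c
      = c + (L.map (fun i => if P i then (1 : Int) else 0)).sum := by
  induction L with
  | nil => intro c; simp
  | cons x xs ih =>
      intro c
      simp only [List.foldl_cons, List.map_cons, List.sum_cons, ih]
      split <;> ring

-- fold of B's loop body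
theorem pvFoldB (l : List Char) : ∀ (c s : Int),
    (l.foldl (fun (st : Int × Int) ch =>
        if pvIsV ch then (st.1 + (if st.2 + 1 ≥ 3 then 1 else 0), st.2 + 1)
        else (st.1, 0)) (c, s)).1 = c + pvWk s l := by
  induction l with
  | nil => intro c s; simp [pvWk]
  | cons x xs ih =>
      intro c s
      simp only [List.foldl_cons]
      by_cases h : pvIsV x
      · have h3 : (s + 1 ≥ 3) = (s ≥ 2) := by
          simp only [ge_iff_le, eq_iff_iff]; omega
        simp only [h, if_true, ih, pvWk, h3]
        split <;> ring
      · simp [h, ih, pvWk]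

-- ===== VERDICT (by name: the statement is the Claim_ definition above) =====
theorem count_vowel_triplets_spec : Claim_equal_count_vowel_triplets := by
  intro text _
  unfold Spec_count_vowel_triplets count_vowel_triplets count_vowel_triplets_alt
  simp only [PySem.Str.len_eq, PySem.Str.toList_lower, PySem.Str.pyGet?_eq,
    PySem.Chars.pyGet?_eq_listPyGet?]
  set l := PySem.Chars.lower text.toList with hl
  -- B side: streak fold = pvWk 0 = pvA3
  have hB : (List.foldl (fun (st : Int × Int) ch =>
        if (PySem.Set.ofList ['a', 'e', 'i', 'o', 'u', 'y']).contains ch then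
          (st.1 + if st.2 + 1 ≥ 3 then 1 else 0, st.2 + 1)
        else (st.1, 0)) ((0 : Int), (0 : Int)) l).1 = 0 + pvWk 0 l := pvFoldB l 0 0
  rw [hB, pvWk_zero, zero_add]
  -- A side: range fold = 0/1-sum = pvA3
  rw [PySem.List.pyRange_one]
  have hn : ((l.length : Int) - 2 - 0).toNat = l.length - 2 := by omega
  rw [hn, List.foldl_map]
  have hfun : (fun (count : Int) (k : Nat) =>
      if ((PySem.List.pyGet? l (0 + (k : Int))).any (fun c => (PySem.Set.ofList ['a', 'e', 'i', 'o', 'u', 'y']).contains c) &&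
          (PySem.List.pyGet? l (0 + (k : Int) + 1)).any (fun c => (PySem.Set.ofList ['a', 'e', 'i', 'o', 'u', 'y']).contains c) &&
          (PySem.List.pyGet? l (0 + (k : Int) + 2)).any (fun c => (PySem.Set.ofList ['a', 'e', 'i', 'o', 'u', 'y']).contains c))
      then count + 1 else count)
      = fun (count : Int) (k : Nat) => if pvW3 l k then count + 1 else count := by
    funext count k
    have e0 : (0 + (k : Int)) = ((k : Nat) : Int) := zero_add _
    have e1 : ((k : Int) + 1) = ((k + 1 : Nat) : Int) := by push_cast; ring
    have e2 : ((k : Int) + 2) = ((k + 2 : Nat) : Int) := by push_cast; ring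
    rw [e0, e1, e2, PySem.List.pyGet?_natCast, PySem.List.pyGet?_natCast, PySem.List.pyGet?_natCast]
    simp only [pvW3]
    rfl
  rw [hfun, pvFoldA (List.range (l.length - 2)) (pvW3 l) 0, zero_add]
  exact pvSum_eq_A3 l
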